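-- pv_equiv track=rewrite | github.com/hcftrize/rize-data | scripts/scrape-canton.py | guess_tags_from_text_blocks
-- ===== SOURCE A (Python) =====
-- from typing import Iterable
--
-- KNOWN_ROLES = {
--     "Apps (All)",
--     "Apps (Featured)",
--     "Canton Foundation Member",
--     "Financial Institutions",
--     "Industry Bodies",
--     "Market Infrastructure",
--     "Service Provider",
--     "Super Validator",
--     "Validator",
-- }
--
-- KNOWN_NETWORK_UTILITIES = {
--     "Compliance",
--     "Custody",
--     "Data & Analytics",
--     "Developer Tools",
--     "Exchanges",
--     "Financing",
--     "Forensics & Security",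
--     "Interoperability",
--     "Liquidity",
--     "NaaS",
--     "Payments",
--     "Stablecoins",
--     "Tokenized Assets",
--     "Wallets",
-- }
--
-- def unique_keep_order(items: Iterable[str]) -> list[str]:
--     seen: set[str] = set()
--     output: list[str] = []
--     for item in items:
--         if not item:
--             continue
--         if item in seen:
--             continue
--         seen.add(item)
--         output.append(item)
--     return output
--
-- def guess_tags_from_text_blocks(texts: list[str]) -> tuple[list[str], list[str]]:
--     roles: list[str] = []
--     utilities: list[str] = []
--
--     for text in texts:
--         if text in KNOWN_ROLES:
--             roles.append(text)
--         if text in KNOWN_NETWORK_UTILITIES: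
--             utilities.append(text)
--
--     return unique_keep_order(roles), unique_keep_order(utilities)
-- ===== SOURCE B (Python) =====
-- ROLE_TAGS = [
--     "Apps (All)",
--     "Apps (Featured)",
--     "Canton Foundation Member",
--     "Financial Institutions",
--     "Industry Bodies",
--     "Market Infrastructure",
--     "Service Provider",
--     "Super Validator",
--     "Validator",
-- ]
--
-- UTILITY_TAGS = [
--     "Compliance",
--     "Custody",
--     "Data & Analytics",
--     "Developer Tools",
--     "Exchanges",
--     "Financing",
--     "Forensics & Security",
--     "Interoperability",
--     "Liquidity",
--     "NaaS",
--     "Payments",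
--     "Stablecoins",
--     "Tokenized Assets",
--     "Wallets",
-- ]
--
-- def guess_tags_from_text_blocks(texts: list[str]) -> tuple[list[str], list[str]]:
--     # Vocabulary-driven: for each known tag, check presence and order the hits
--     # by the position of their first occurrence in texts.
--     def pick(vocab: list[str]) -> list[str]:
--         return sorted((t for t in vocab if t in texts), key=texts.index)
--     return pick(ROLE_TAGS), pick(UTILITY_TAGS)
-- ===== Notes on version B (the rewrite author's own statement) =====
-- stated objective: alternative
-- what changed: B inverts the iteration: instead of scanning texts and deduplicating with seen-sets, it scans the fixed tag vocabularies, keeps each tag present in texts, and sorts the hits by the index of their first occurrence (texts.index).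
import Mathlib
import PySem

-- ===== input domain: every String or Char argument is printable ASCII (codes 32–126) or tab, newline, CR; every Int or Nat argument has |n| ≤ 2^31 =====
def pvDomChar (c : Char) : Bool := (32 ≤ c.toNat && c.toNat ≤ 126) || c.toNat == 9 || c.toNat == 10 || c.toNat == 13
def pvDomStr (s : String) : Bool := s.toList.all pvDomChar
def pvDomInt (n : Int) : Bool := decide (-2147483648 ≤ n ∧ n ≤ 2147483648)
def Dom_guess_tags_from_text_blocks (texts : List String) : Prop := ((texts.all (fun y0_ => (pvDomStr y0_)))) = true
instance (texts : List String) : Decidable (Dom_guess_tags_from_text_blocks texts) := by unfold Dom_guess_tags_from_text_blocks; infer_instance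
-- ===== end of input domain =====

-- B inverts the iteration: it scans the fixed tag vocabularies, keeps tags present in
-- texts, and sorts the hits by first-occurrence index, instead of A's scan of texts
-- with per-list seen-set deduplication (objective: alternative algorithm).

-- ===== PORT A =====
def KNOWN_ROLES : PySem.Set String := PySem.Set.ofList
  ["Apps (All)", "Apps (Featured)", "Canton Foundation Member", "Financial Institutions",
   "Industry Bodies", "Market Infrastructure", "Service Provider", "Super Validator", "Validator"]

def KNOWN_NETWORK_UTILITIES : PySem.Set String := PySem.Set.ofList
  ["Compliance", "Custody", "Data & Analytics", "Developer Tools", "Exchanges", "Financing",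
   "Forensics & Security", "Interoperability", "Liquidity", "NaaS", "Payments", "Stablecoins",
   "Tokenized Assets", "Wallets"]

def unique_keep_order (items : List String) : List String :=
  (items.foldl
    (fun (st : PySem.Set String × List String) item =>
      if item = "" then st
      else if PySem.Set.contains st.1 item then st
      else (PySem.Set.add st.1 item, st.2 ++ [item]))
    (PySem.Set.empty, [])).2

def guess_tags_from_text_blocks (texts : List String) : List String × List String :=
  let p := texts.foldl
    (fun (st : List String × List String) text =>
      (if PySem.Set.contains KNOWN_ROLES text then st.1 ++ [text] else st.1,
       if PySem.Set.contains KNOWN_NETWORK_UTILITIES text then st.2 ++ [text] else st.2))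
    ([], [])
  (unique_keep_order p.1, unique_keep_order p.2)

-- ===== PORT B =====
def ROLE_TAGS : List String :=
  ["Apps (All)", "Apps (Featured)", "Canton Foundation Member", "Financial Institutions",
   "Industry Bodies", "Market Infrastructure", "Service Provider", "Super Validator", "Validator"]

def UTILITY_TAGS : List String :=
  ["Compliance", "Custody", "Data & Analytics", "Developer Tools", "Exchanges", "Financing",
   "Forensics & Security", "Interoperability", "Liquidity", "NaaS", "Payments", "Stablecoins",
   "Tokenized Assets", "Wallets"]

-- 'sorted(..., key=texts.index)': the key is only applied to tags present in texts,
-- where index? is some; the getD 0 default is never consulted (exact there).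
def pickTags (texts vocab : List String) : List String :=
  PySem.List.sorted (vocab.filter (fun t => texts.contains t))
    (fun t => (PySem.List.index? texts t).getD 0) false

def guess_tags_from_text_blocks_alt (texts : List String) : List String × List String :=
  (pickTags texts ROLE_TAGS, pickTags texts UTILITY_TAGS)

-- ===== PRECONDITION & SPEC =====
def Spec_guess_tags_from_text_blocks (texts : List String) (out : List String × List String) : Prop := out = guess_tags_from_text_blocks_alt texts
instance (texts : List String) (out : List String × List String) : Decidable (Spec_guess_tags_from_text_blocks texts out) := by unfold Spec_guess_tags_from_text_blocks; infer_instance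

-- ===== CLAIM (what is proved, stated in full; the proofs are below) =====
def Claim_equal_guess_tags_from_text_blocks : Prop := ∀ (texts : List String), Dom_guess_tags_from_text_blocks texts → Spec_guess_tags_from_text_blocks texts (guess_tags_from_text_blocks texts)

-- ===== LEMMAS AND PROOFS =====

-- A's unique_keep_order loop, as a structural recursion on the remaining items.
def ukoGo (s : PySem.Set String) : List String → List String
  | [] => []
  | x :: xs =>
    if x = "" then ukoGo s xs
    else if PySem.Set.contains s x then ukoGo s xs
    else x :: ukoGo (PySem.Set.add s x) xs

-- Python dedup (first occurrences), as a structural recursion carrying the seen set.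
def dGo (t : PySem.Set String) : List String → List String
  | [] => []
  | x :: xs =>
    if PySem.Set.contains t x then dGo t xs
    else x :: dGo (PySem.Set.add t x) xs

theorem uko_fold (xs : List String) : ∀ (s : PySem.Set String) (out : List String),
    (xs.foldl
      (fun (st : PySem.Set String × List String) item =>
        if item = "" then st
        else if PySem.Set.contains st.1 item then st
        else (PySem.Set.add st.1 item, st.2 ++ [item]))
      (s, out)).2 = out ++ ukoGo s xs := by
  induction xs with
  | nil => intro s out; simp [ukoGo]
  | cons x xs ih =>
    intro s out
    by_cases hx : x = ""
    · simp only [List.foldl, ukoGo, hx, if_true]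
      exact ih s out
    · by_cases hm : x ∈ s
      · simp only [List.foldl, ukoGo, hx, if_false]
        simpa [hm] using ih s out
      · simp only [List.foldl, ukoGo, hx, if_false]
        simpa [hm] using ih (PySem.Set.add s x) (out ++ [x])

theorem unique_keep_order_eq (items : List String) :
    unique_keep_order items = ukoGo PySem.Set.empty items := by
  simpa [unique_keep_order] using uko_fold items PySem.Set.empty []

theorem update_eq_append_dGo (xs : List String) : ∀ (t : PySem.Set String),
    PySem.Set.update t xs = t ++ dGo t xs := by
  induction xs with
  | nil => intro t; simp [dGo, PySem.Set.update_nil]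
  | cons x xs ih =>
    intro t
    rw [PySem.Set.update_cons, ih (PySem.Set.add t x)]
    by_cases hm : x ∈ t
    · rw [PySem.Set.add_of_mem hm]
      simp [dGo, hm]
    · simp [dGo, hm]

theorem dedup_eq_dGo (xs : List String) : PySem.List.dedup xs = dGo PySem.Set.empty xs := by
  have h := update_eq_append_dGo xs ([] : PySem.Set String)
  rw [PySem.Set.update_nil_left] at h
  simpa [PySem.List.dedup_eq_ofList, PySem.Set.empty] using h

theorem uko_filter_eq_dGo_filter (p : String → Bool) (hp0 : p "" = false)
    (xs : List String) : ∀ (s t : PySem.Set String),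
    (∀ y, p y = true → (y ∈ s ↔ y ∈ t)) →
    ukoGo s (xs.filter p) = (dGo t xs).filter p := by
  induction xs with
  | nil => intro s t _; simp [ukoGo, dGo]
  | cons x xs ih =>
    intro s t hagree
    cases hpx : p x
    · have hlhs : (x :: xs).filter p = xs.filter p := by simp [List.filter, hpx]
      rw [hlhs]
      by_cases hm : x ∈ t
      · simp only [dGo]
        simpa [hm] using ih s t hagree
      · have hnx : ∀ y, p y = true → (y ∈ s ↔ y ∈ PySem.Set.add t x) := by
          intro y hy
          have hyx : y ≠ x := fun h => by rw [h, hpx] at hy; cases hy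
          rw [PySem.Set.mem_add]
          exact ⟨fun h => Or.inl ((hagree y hy).mp h),
                 fun h => (hagree y hy).mpr (h.resolve_right hyx)⟩
        simp only [dGo]
        simpa [hm, List.filter, hpx] using ih s (PySem.Set.add t x) hnx
    · have hxne : ¬ (x = "") := fun h => by rw [h, hp0] at hpx; cases hpx
      have hst := hagree x hpx
      have hlhs : (x :: xs).filter p = x :: xs.filter p := by simp [List.filter, hpx]
      rw [hlhs]
      by_cases hm : x ∈ t
      · have hms : x ∈ s := hst.mpr hm
        simp only [ukoGo, dGo]
        simpa [hxne, hms, hm] using ih s t hagree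
      · have hms : x ∉ s := fun h => hm (hst.mp h)
        have hadd : ∀ y, p y = true → (y ∈ PySem.Set.add s x ↔ y ∈ PySem.Set.add t x) := by
          intro y hy
          rw [PySem.Set.mem_add, PySem.Set.mem_add]
          exact or_congr (hagree y hy) Iff.rfl
        simp only [ukoGo, dGo]
        simpa [hxne, hms, hm, List.filter, hpx] using
          ih (PySem.Set.add s x) (PySem.Set.add t x) hadd

theorem pair_fold_split (xs : List String) : ∀ (a b : List String),
    xs.foldl
      (fun (st : List String × List String) text =>
        (if PySem.Set.contains KNOWN_ROLES text then st.1 ++ [text] else st.1,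
         if PySem.Set.contains KNOWN_NETWORK_UTILITIES text then st.2 ++ [text] else st.2))
      (a, b)
    = (a ++ xs.filter (fun t => PySem.Set.contains KNOWN_ROLES t),
       b ++ xs.filter (fun t => PySem.Set.contains KNOWN_NETWORK_UTILITIES t)) := by
  induction xs with
  | nil => intro a b; simp
  | cons x xs ih =>
    intro a b
    simp only [List.foldl, ih, List.filter]
    by_cases h1 : x ∈ KNOWN_ROLES <;> by_cases h2 : x ∈ KNOWN_NETWORK_UTILITIES <;>
      simp [h1, h2]

-- A's component equals the membership-filter of Python's ordered dedup of texts.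
theorem componentA_eq (p : String → Bool) (hp0 : p "" = false) (texts : List String) :
    unique_keep_order (texts.filter p) = (PySem.List.dedup texts).filter p := by
  rw [unique_keep_order_eq, dedup_eq_dGo]
  exact uko_filter_eq_dGo_filter p hp0 texts PySem.Set.empty PySem.Set.empty (fun _ _ => Iff.rfl)

-- first-occurrence index key used by B
def keyOf (texts : List String) (t : String) : Nat := (PySem.List.index? texts t).getD 0

theorem mem_dGo {y : String} : ∀ (xs : List String) (t : PySem.Set String),
    y ∈ dGo t xs → y ∈ xs ∧ y ∉ t := by
  intro xs
  induction xs with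
  | nil => intro t h; simp [dGo] at h
  | cons x xs ih =>
    intro t h
    by_cases hm : x ∈ t
    · have hd : dGo t (x :: xs) = dGo t xs := by simp [dGo, hm]
      rw [hd] at h
      have := ih t h
      exact ⟨List.mem_cons_of_mem _ this.1, this.2⟩
    · have hd : dGo t (x :: xs) = x :: dGo (PySem.Set.add t x) xs := by simp [dGo, hm]
      rw [hd] at h
      rcases List.mem_cons.mp h with hyx | hy
      · exact ⟨by simp [hyx], by simpa [hyx] using hm⟩
      · have := ih (PySem.Set.add t x) hy
        have hnt : y ∉ t := fun hc => this.2 (by rw [PySem.Set.mem_add]; exact Or.inl hc)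
        exact ⟨List.mem_cons_of_mem _ this.1, hnt⟩

theorem keyOf_cons_of_ne_mem {x y : String} {xs : List String}
    (hyx : y ≠ x) (hy : y ∈ xs) : keyOf (x :: xs) y = keyOf xs y + 1 := by
  obtain ⟨i, hi⟩ := Option.isSome_iff_exists.mp ((PySem.List.index?_isSome_iff xs y).mpr hy)
  rw [keyOf, keyOf, PySem.List.index?_cons_of_ne xs (fun h => hyx h.symm), hi]
  rfl

theorem pairwise_key_dGo : ∀ (xs : List String) (t : PySem.Set String),
    (dGo t xs).Pairwise (fun a b => keyOf xs a < keyOf xs b) := by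
  intro xs
  induction xs with
  | nil => intro t; simp [dGo]
  | cons x xs ih =>
    intro t
    by_cases hm : x ∈ t
    · have hd : dGo t (x :: xs) = dGo t xs := by simp [dGo, hm]
      rw [hd]
      refine (ih t).imp_of_mem ?_
      intro a b ha hb hab
      have hax := mem_dGo xs t ha
      have hbx := mem_dGo xs t hb
      have hane : a ≠ x := fun h => hax.2 (h ▸ hm)
      have hbne : b ≠ x := fun h => hbx.2 (h ▸ hm)
      rw [keyOf_cons_of_ne_mem hane hax.1, keyOf_cons_of_ne_mem hbne hbx.1]
      omega
    · have hd : dGo t (x :: xs) = x :: dGo (PySem.Set.add t x) xs := by simp [dGo, hm]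
      rw [hd, List.pairwise_cons]
      constructor
      · intro b hb
        have hbx := mem_dGo xs (PySem.Set.add t x) hb
        have hbne : b ≠ x := fun h => hbx.2 (by rw [h, PySem.Set.mem_add]; exact Or.inr rfl)
        have hx0 : keyOf (x :: xs) x = 0 := by
          rw [keyOf, PySem.List.index?_cons_self]; rfl
        rw [hx0, keyOf_cons_of_ne_mem hbne hbx.1]
        omega
      · refine (ih (PySem.Set.add t x)).imp_of_mem ?_
        intro a b ha hb hab
        have hax := mem_dGo xs (PySem.Set.add t x) ha
        have hbx := mem_dGo xs (PySem.Set.add t x) hb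
        have hane : a ≠ x := fun h => hax.2 (by rw [h, PySem.Set.mem_add]; exact Or.inr rfl)
        have hbne : b ≠ x := fun h => hbx.2 (by rw [h, PySem.Set.mem_add]; exact Or.inr rfl)
        rw [keyOf_cons_of_ne_mem hane hax.1, keyOf_cons_of_ne_mem hbne hbx.1]
        omega

theorem pairwise_key_dedup (texts : List String) :
    (PySem.List.dedup texts).Pairwise (fun a b => keyOf texts a < keyOf texts b) := by
  rw [dedup_eq_dGo]
  exact pairwise_key_dGo texts PySem.Set.empty

-- B's component equals the same membership-filter of the ordered dedup.
theorem pickTags_eq (texts vocab : List String) (hv : vocab.Nodup) :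
    pickTags texts vocab = (PySem.List.dedup texts).filter (fun t => vocab.contains t) := by
  apply PySem.List.sorted_eq_of_perm_of_pairwise_lt
  · apply (List.perm_ext_iff_of_nodup ((PySem.List.nodup_dedup texts).filter _)
      (hv.filter _)).mpr
    intro y
    simp [and_comm]
  · exact (pairwise_key_dedup texts).filter _

-- ===== VERDICT (by name: the statement is the Claim_ definition above) =====
theorem guess_tags_from_text_blocks_spec : Claim_equal_guess_tags_from_text_blocks := by
  intro texts _
  show guess_tags_from_text_blocks texts = guess_tags_from_text_blocks_alt texts
  have hr0 : (fun t => PySem.Set.contains KNOWN_ROLES t) "" = false := by decide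
  have hu0 : (fun t => PySem.Set.contains KNOWN_NETWORK_UTILITIES t) "" = false := by decide
  have hroles : KNOWN_ROLES = ROLE_TAGS := by decide
  have hutils : KNOWN_NETWORK_UTILITIES = UTILITY_TAGS := by decide
  simp only [guess_tags_from_text_blocks, guess_tags_from_text_blocks_alt,
    pair_fold_split, List.nil_append]
  rw [componentA_eq _ hr0, componentA_eq _ hu0,
    pickTags_eq texts ROLE_TAGS (by decide), pickTags_eq texts UTILITY_TAGS (by decide)]
  rw [hroles, hutils]
  rfl
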